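-- pv_equiv track=rewrite | github.com/NRSummerfield/Stuff | Stuff/build/lib/Stuff/PreProcessing/MakeMask.py | search
-- ===== SOURCE A (Python) =====
-- def conflict(search_list: list[str]):
--
--     conf = {k: [] for k in search_list}
--
--     for i in range(len(search_list)):
--         # isolate a key and get a list of remainder keys
--         k = search_list[i]
--         _list = search_list.copy()
--         _list.pop(i)
--
--         # check to see if there is a potential search conflict
--         for k_ in _list:
--             if k in k_: conf[k].append(k_)
--
--     return conf
--
-- def search(search_key: str, search_list: list[str]):
--
--     if not isinstance(search_key, str): TypeError(f'Input {search_key} must be a string')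
--
--     conf = conflict(search_list)
--
--     # uniformity
--     k = search_key.upper()
--     # iterate over search list (sl)
--
--     for sl in search_list:
--
--         # if one of the known keys (kk) is in the search key (k):
--         if sl in k:
--
--             # Looking for a competing interst (ci) conflict
--             if conf[sl]:
--                 ci = False
--                 for c in conf[sl]:
--                     if c in k:
--                         ci = True
--
--                 # only if no competing interest (ci) return True
--                 if not ci: return True
--
--             # if no conflict, return True
--             else: return True
--
--     # if no matching key found
--     return False
-- ===== SOURCE B (Python) =====
-- def search(search_key: str, search_list: list[str]):
--     # One filter pass keeps only keys that occur in the upper-cased search key;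
--     # conflicts are then checked only among those survivors.
--     K = search_key.upper()
--     S = [x for x in search_list if x in K]
--     for i in range(len(S)):
--         if all(S[i] not in S[j] for j in range(len(S)) if j != i):
--             return True
--     return False
-- ===== Notes on version B (the rewrite author's own statement) =====
-- stated objective: faster
-- what changed: B filters the list once down to the keys that occur in the upper-cased search key and checks superstring conflicts only among those survivors, instead of A's building of the full pairwise conflict dict over the whole list before scanning it.
import Mathlib
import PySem

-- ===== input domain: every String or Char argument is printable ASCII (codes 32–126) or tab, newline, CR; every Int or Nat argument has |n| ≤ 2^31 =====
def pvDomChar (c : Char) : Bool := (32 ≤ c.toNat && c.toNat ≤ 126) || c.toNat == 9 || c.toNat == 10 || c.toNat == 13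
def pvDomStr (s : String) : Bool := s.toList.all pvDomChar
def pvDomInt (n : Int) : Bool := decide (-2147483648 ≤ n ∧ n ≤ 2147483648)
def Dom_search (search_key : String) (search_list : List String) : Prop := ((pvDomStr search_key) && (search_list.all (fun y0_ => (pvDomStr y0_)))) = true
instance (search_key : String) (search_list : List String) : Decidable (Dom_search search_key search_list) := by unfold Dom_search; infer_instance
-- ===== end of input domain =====

-- B filters the list once down to the keys occurring in the upper-cased search key and
-- checks superstring conflicts only among those survivors (objective: faster on lists
-- with few matching keys; A builds the full pairwise conflict dict over the whole list).

-- ===== PORT A =====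
-- conflict(search_list): dict of, for each key, the other entries having it as substring
def conflict (search_list : List String) : PySem.Dict String (List String) :=
  -- conf = {k: [] for k in search_list}
  let conf := search_list.foldl (fun d k => d.insert k ([] : List String)) PySem.Dict.empty
  -- for i in range(len(search_list)): …
  (PySem.List.pyRange 0 (PySem.List.len search_list) 1).foldl (fun conf i =>
    let k := PySem.List.pyGetD search_list i ""
    -- _list = search_list.copy(); _list.pop(i)  (i is always in range here)
    match PySem.List.pop? search_list i with
    | some (_, _list) =>
        -- for k_ in _list: if k in k_: conf[k].append(k_)
        _list.foldl (fun conf k_ =>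
          if PySem.Str.isIn k k_ then conf.modify k [] (fun v => v ++ [k_]) else conf) conf
    | none => conf) conf

-- the 'for sl in search_list' loop of search, with its early returns
def searchLoop (conf : PySem.Dict String (List String)) (k : String) : List String → Bool
  | [] => false                                  -- return False after the loop
  | sl :: rest =>
    if PySem.Str.isIn sl k then                  -- if sl in k
      -- conf[sl]: sl comes from search_list, so it is always a key of conf (no KeyError)
      let cl := conf.getD sl []
      if !cl.isEmpty then                        -- if conf[sl]:
        let ci := cl.foldl (fun ci c => if PySem.Str.isIn c k then true else ci) false
        if !ci then true else searchLoop conf k rest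
      else true                                  -- else: return True
    else searchLoop conf k rest

def search (search_key : String) (search_list : List String) : Bool :=
  -- the isinstance line of A constructs a TypeError but never raises it: no effect
  let conf := conflict search_list
  let k := PySem.Str.upper search_key
  searchLoop conf k search_list

-- ===== PORT B =====
def search_alt (search_key : String) (search_list : List String) : Bool :=
  let K := PySem.Str.upper search_key
  let S := search_list.filter (fun x => PySem.Str.isIn x K)
  (PySem.List.pyRange 0 (PySem.List.len S) 1).any (fun i =>
    (PySem.List.pyRange 0 (PySem.List.len S) 1).all (fun j =>
      j == i || !(PySem.Str.isIn (PySem.List.pyGetD S i "") (PySem.List.pyGetD S j ""))))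

-- ===== PRECONDITION & SPEC =====
def Spec_search (search_key : String) (search_list : List String) (out : Bool) : Prop := out = search_alt search_key search_list
instance (search_key : String) (search_list : List String) (out : Bool) : Decidable (Spec_search search_key search_list out) := by unfold Spec_search; infer_instance

-- ===== CLAIM (what is proved, stated in full; the proofs are below) =====
def Claim_equal_search : Prop := ∀ (search_key : String) (search_list : List String), Dom_search search_key search_list → Spec_search search_key search_list (search search_key search_list)

-- ===== LEMMAS AND PROOFS =====

-- 'sl in sl' is always true
theorem isIn_self (x : String) : PySem.Str.isIn x x = true := by
  rw [PySem.Str.isIn_iff_infix]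

-- A's ci-loop computes List.any
theorem foldl_ci_eq_any (k : String) (cl : List String) (b : Bool) :
    cl.foldl (fun ci c => if PySem.Str.isIn c k then true else ci) b
      = (b || cl.any (fun c => PySem.Str.isIn c k)) := by
  induction cl generalizing b with
  | nil => simp
  | cons c cl ih =>
    simp only [List.foldl_cons, List.any_cons]
    rw [ih]
    by_cases h : PySem.Str.isIn c k = true
    · simp only [h, if_true, Bool.true_or, Bool.or_true]
    · have hf : PySem.Str.isIn c k = false := by simpa using h
      simp only [hf]
      simp

-- the dict comprehension maps every key to []
theorem conf0_getD (L : List String) (c : String) (d : PySem.Dict String (List String))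
    (h : d.getD c [] = []) :
    (L.foldl (fun d k => d.insert k ([] : List String)) d).getD c [] = [] := by
  induction L generalizing d with
  | nil => simpa using h
  | cons a L ih =>
    simp only [List.foldl_cons]
    exact ih _ (by rw [PySem.Dict.getD_insert]; split <;> simp [h])

-- the inner append loop of conflict, per fixed key k
theorem inner_getD (k c : String) (l : List String) (conf : PySem.Dict String (List String)) :
    (l.foldl (fun conf k_ =>
        if PySem.Str.isIn k k_ then conf.modify k [] (fun v => v ++ [k_]) else conf) conf).getD c []
      = conf.getD c [] ++ (if c = k then l.filter (fun k_ => PySem.Str.isIn k k_) else []) := by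
  induction l generalizing conf with
  | nil => simp
  | cons a l ih =>
    simp only [List.foldl_cons, List.filter_cons]
    by_cases h : PySem.Str.isIn k a = true
    · rw [if_pos h, ih, PySem.Dict.getD_modify]
      by_cases hc : c = k
      · subst hc
        rw [if_pos rfl, if_pos rfl, if_pos rfl, if_pos h, List.append_assoc,
          List.singleton_append]
      · rw [if_neg hc, if_neg hc, if_neg hc]
    · rw [if_neg h, ih]
      by_cases hc : c = k
      · rw [if_pos hc, if_pos hc, if_neg h]
      · rw [if_neg hc, if_neg hc]

-- per-index contribution of conflict's outer loop
def contrib (L : List String) (sl : String) (j : Nat) : List String :=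
  if sl = L.getD j "" then (L.eraseIdx j).filter (fun k_ => PySem.Str.isIn (L.getD j "") k_) else []

theorem conflict_getD (L : List String) (sl : String) :
    (conflict L).getD sl [] = (List.range L.length).flatMap (contrib L sl) := by
  unfold conflict
  rw [PySem.List.len, PySem.List.pyRange_one]
  simp only [Int.sub_zero, Int.toNat_natCast, List.foldl_map]
  have init : ∀ (js : List Nat), (∀ j ∈ js, j < L.length) →
      ∀ d : PySem.Dict String (List String),
      (js.foldl (fun conf (j : Nat) =>
        let k := PySem.List.pyGetD L (0 + (j : Int)) ""
        match PySem.List.pop? L (0 + (j : Int)) with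
        | some (_, _list) =>
            _list.foldl (fun conf k_ =>
              if PySem.Str.isIn k k_ then conf.modify k [] (fun v => v ++ [k_]) else conf) conf
        | none => conf) d).getD sl []
      = d.getD sl [] ++ js.flatMap (contrib L sl) := by
    intro js
    induction js with
    | nil => intro _ d; simp
    | cons j js ih =>
      intro hmem d
      have hj : j < L.length := hmem j (by simp)
      simp only [List.foldl_cons, List.flatMap_cons]
      have hz : ((0:Int) + (j:Int)) = ((j:Nat) : Int) := by ring
      rw [hz, ih (fun x hx => hmem x (by simp [hx])), PySem.List.pop?_natCast L j hj]
      simp only [PySem.List.pyGetD_natCast]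
      rw [inner_getD]
      have hget : L[j] = L.getD j "" := (List.getD_eq_getElem L "" hj).symm
      unfold contrib
      by_cases hc : sl = L.getD j ""
      · simp only [if_pos hc, List.append_assoc]
      · simp only [if_neg hc, List.append_nil, List.nil_append]
  rw [init _ (fun j hj => List.mem_range.mp hj) _,
      conf0_getD L sl PySem.Dict.empty (by simp [PySem.Dict.getD_empty]), List.nil_append]

-- membership in conf[sl]
theorem mem_conflict (L : List String) (sl c : String) :
    c ∈ (conflict L).getD sl [] ↔
      ∃ j, ∃ _ : j < L.length, sl = L.getD j "" ∧ c ∈ L.eraseIdx j ∧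
        PySem.Str.isIn sl c = true := by
  rw [conflict_getD]
  simp only [List.mem_flatMap, List.mem_range, contrib]
  constructor
  · rintro ⟨j, hj, hc⟩
    by_cases h : sl = L.getD j ""
    · rw [if_pos h] at hc
      simp only [List.mem_filter] at hc
      exact ⟨j, hj, h, hc.1, by rw [h]; exact hc.2⟩
    · rw [if_neg h] at hc; simp at hc
  · rintro ⟨j, hj, h, hc, hsub⟩
    exact ⟨j, hj, by rw [if_pos h]; exact List.mem_filter.mpr ⟨hc, by rw [← h]; exact hsub⟩⟩

-- searchLoop = true  iff  some element passes with a conflict-free lookup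
theorem searchLoop_iff (conf : PySem.Dict String (List String)) (k : String) (l : List String) :
    searchLoop conf k l = true ↔
      ∃ sl ∈ l, PySem.Str.isIn sl k = true ∧
        (conf.getD sl []).any (fun c => PySem.Str.isIn c k) = false := by
  induction l with
  | nil => simp [searchLoop]
  | cons sl rest ih =>
    simp only [searchLoop]
    by_cases h1 : PySem.Str.isIn sl k
    · rw [if_pos h1]
      by_cases h2 : ((conf.getD sl []).isEmpty : Bool)
      · have hcl : conf.getD sl [] = [] := by simpa [List.isEmpty_iff] using h2
        simp only [h2, Bool.not_true, Bool.false_eq_true, if_false, true_iff]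
        exact ⟨sl, by simp, h1, by rw [hcl]; rfl⟩
      · rw [foldl_ci_eq_any]
        simp only [h2, Bool.not_false, if_true, Bool.false_or]
        by_cases h3 : (conf.getD sl []).any (fun c => PySem.Str.isIn c k) = true
        · rw [h3]
          simp only [Bool.not_true]
          rw [if_neg Bool.false_ne_true, ih]
          constructor
          · rintro ⟨x, hx, p⟩; exact ⟨x, by simp [hx], p⟩
          · rintro ⟨x, hx, p1, p2⟩
            rcases List.mem_cons.mp hx with rfl | hx
            · rw [p2] at h3; exact absurd h3 (by simp)
            · exact ⟨x, hx, p1, p2⟩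
        · have hf : (conf.getD sl []).any (fun c => PySem.Str.isIn c k) = false := by
            simpa using h3
          rw [hf]
          simp only [Bool.not_false, if_true]
          exact iff_of_true trivial ⟨sl, by simp, h1, hf⟩
    · rw [if_neg h1, ih]
      constructor
      · rintro ⟨x, hx, p⟩; exact ⟨x, by simp [hx], p⟩
      · rintro ⟨x, hx, p1, p2⟩
        rcases List.mem_cons.mp hx with rfl | hx
        · exact absurd p1 (by simpa using h1)
        · exact ⟨x, hx, p1, p2⟩

-- two distinct positions with given values = membership plus a count condition
theorem pairAt_iff (X : List String) (a b : String) :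
    (∃ j i, ∃ _ : j < X.length, ∃ _ : i < X.length, i ≠ j ∧ X.getD j "" = a ∧ X.getD i "" = b)
      ↔ (a ∈ X ∧ b ∈ X ∧ (a ≠ b ∨ 2 ≤ X.count a)) := by
  constructor
  · rintro ⟨j, i, hj, hi, hne, ha, hb⟩
    rw [List.getD_eq_getElem X "" hj] at ha
    rw [List.getD_eq_getElem X "" hi] at hb
    refine ⟨ha ▸ List.getElem_mem hj, hb ▸ List.getElem_mem hi, ?_⟩
    by_cases hab : a = b
    · right
      rw [← List.duplicate_iff_two_le_count, List.duplicate_iff_exists_distinct_get]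
      rcases Nat.lt_trichotomy i j with h | h | h
      · exact ⟨⟨i, hi⟩, ⟨j, hj⟩, h,
          by simp only [List.get_eq_getElem]; rw [hb]; exact hab,
          by simp only [List.get_eq_getElem]; rw [ha]⟩
      · exact absurd h hne
      · exact ⟨⟨j, hj⟩, ⟨i, hi⟩, h,
          by simp only [List.get_eq_getElem]; rw [ha],
          by simp only [List.get_eq_getElem]; rw [hb]; exact hab⟩
    · left; exact hab
  · rintro ⟨ha, hb, hcase⟩
    by_cases hab : a = b
    · subst hab
      have hcount : 2 ≤ X.count a := hcase.resolve_left (fun h => h rfl)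
      rw [← List.duplicate_iff_two_le_count, List.duplicate_iff_exists_distinct_get] at hcount
      rcases hcount with ⟨⟨i, hi⟩, ⟨j, hj⟩, hlt, h1, h2⟩
      refine ⟨j, i, hj, hi, by have hlt' : i < j := hlt; omega, ?_, ?_⟩
      · rw [List.getD_eq_getElem X "" hj]; simpa using h2.symm
      · rw [List.getD_eq_getElem X "" hi]; simpa using h1.symm
    · rcases List.mem_iff_getElem.mp ha with ⟨j, hj, haj⟩
      rcases List.mem_iff_getElem.mp hb with ⟨i, hi, hbi⟩
      refine ⟨j, i, hj, hi, ?_, ?_, ?_⟩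
      · rintro rfl; exact hab (haj ▸ hbi ▸ rfl)
      · rw [List.getD_eq_getElem X "" hj]; exact haj
      · rw [List.getD_eq_getElem X "" hi]; exact hbi

-- B = true  iff  some survivor has no distinct superstring among the survivors
theorem search_alt_iff (search_key : String) (search_list : List String) :
    search_alt search_key search_list = true ↔
      (∃ p, ∃ _ : p < (search_list.filter
          (fun x => PySem.Str.isIn x (PySem.Str.upper search_key))).length,
        ∀ q, q < (search_list.filter
          (fun x => PySem.Str.isIn x (PySem.Str.upper search_key))).length → q ≠ p →
          ¬ (PySem.Str.isIn
              ((search_list.filter (fun x => PySem.Str.isIn x (PySem.Str.upper search_key))).getD p "")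
              ((search_list.filter (fun x => PySem.Str.isIn x (PySem.Str.upper search_key))).getD q "")
              = true)) := by
  unfold search_alt
  simp only [PySem.List.len]
  rw [PySem.List.pyRange_one]
  simp only [Int.sub_zero, Int.toNat_natCast, List.any_map, List.all_map, List.any_eq_true,
    List.all_eq_true, List.mem_range, Function.comp]
  constructor
  · rintro ⟨p, hp, h⟩
    refine ⟨p, hp, fun q hq hqp => ?_⟩
    have := h q hq
    have hz1 : ((0:Int) + (p:Int)) = ((p:Nat) : Int) := by ring
    have hz2 : ((0:Int) + (q:Int)) = ((q:Nat) : Int) := by ring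
    rw [hz1, hz2, PySem.List.pyGetD_natCast, PySem.List.pyGetD_natCast] at this
    rcases Bool.or_eq_true_iff.mp this with h1 | h1
    · exact absurd (by exact_mod_cast (beq_iff_eq.mp h1)) hqp
    · simp only [Bool.not_eq_true'] at h1
      exact Bool.eq_false_iff.mp h1
  · rintro ⟨p, hp, h⟩
    refine ⟨p, hp, fun q hq => ?_⟩
    have hz1 : ((0:Int) + (p:Int)) = ((p:Nat) : Int) := by ring
    have hz2 : ((0:Int) + (q:Int)) = ((q:Nat) : Int) := by ring
    rw [hz1, hz2, PySem.List.pyGetD_natCast, PySem.List.pyGetD_natCast]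
    by_cases hqp : q = p
    · subst hqp; simp
    · have hf := Bool.eq_false_iff.mpr (h q hq hqp)
      rw [hf]
      simp

-- value form of "two distinct positions j (= sl) and i (a superstring of sl in K)"
theorem exists_pair (L : List String) (sl c : String) :
    (∃ j, ∃ _ : j < L.length, sl = L.getD j "" ∧ c ∈ L.eraseIdx j)
      ↔ (sl ∈ L ∧ c ∈ L ∧ (sl ≠ c ∨ 2 ≤ L.count sl)) := by
  rw [← pairAt_iff]
  constructor
  · rintro ⟨j, hj, hsl, hc⟩
    rcases List.mem_eraseIdx_iff_getElem?.mp hc with ⟨i, hij, hi⟩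
    obtain ⟨hilen, hval⟩ := List.getElem?_eq_some_iff.mp hi
    refine ⟨j, i, hj, hilen, hij, hsl.symm, ?_⟩
    rw [List.getD_eq_getElem L "" hilen]
    exact hval
  · rintro ⟨j, i, hj, hi, hij, hsl, hc⟩
    refine ⟨j, hj, hsl.symm, ?_⟩
    refine List.mem_eraseIdx_iff_getElem?.mpr ⟨i, hij, ?_⟩
    rw [List.getElem?_eq_getElem hi, ← List.getD_eq_getElem L "" hi, hc]

-- A = true, in value form
theorem A_iff (search_key : String) (L : List String) :
    search search_key L = true ↔
      ∃ sl ∈ L, PySem.Str.isIn sl (PySem.Str.upper search_key) = true ∧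
        ¬ ∃ b, (sl ∈ L ∧ b ∈ L ∧ (sl ≠ b ∨ 2 ≤ L.count sl)) ∧
          PySem.Str.isIn sl b = true ∧ PySem.Str.isIn b (PySem.Str.upper search_key) = true := by
  unfold search
  rw [searchLoop_iff]
  refine exists_congr fun sl => ?_
  refine and_congr_right fun _ => and_congr_right fun _ => ?_
  rw [List.any_eq_false]
  constructor
  · rintro h ⟨b, hpair, hsub, hbK⟩
    have hb : b ∈ (conflict L).getD sl [] := by
      rw [mem_conflict]
      rcases (exists_pair L sl b).mpr hpair with ⟨j, hj, hsl, hmem⟩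
      exact ⟨j, hj, hsl, hmem, hsub⟩
    exact h b hb hbK
  · intro h b hb hbK
    rcases mem_conflict L sl b |>.mp hb with ⟨j, hj, hsl, hmem, hsub⟩
    exact h ⟨b, (exists_pair L sl b).mp ⟨j, hj, hsl, hmem⟩, hsub, hbK⟩

-- B = true, in value form over the filtered list S
theorem B_iff (search_key : String) (L : List String) :
    search_alt search_key L = true ↔
      ∃ sl ∈ L.filter (fun x => PySem.Str.isIn x (PySem.Str.upper search_key)),
        ¬ ∃ b, (sl ∈ L.filter (fun x => PySem.Str.isIn x (PySem.Str.upper search_key)) ∧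
                b ∈ L.filter (fun x => PySem.Str.isIn x (PySem.Str.upper search_key)) ∧
                (sl ≠ b ∨ 2 ≤ (L.filter (fun x => PySem.Str.isIn x (PySem.Str.upper search_key))).count sl)) ∧
          PySem.Str.isIn sl b = true := by
  rw [search_alt_iff]
  set S := L.filter (fun x => PySem.Str.isIn x (PySem.Str.upper search_key)) with hS
  constructor
  · rintro ⟨p, hp, h⟩
    refine ⟨S.getD p "", ?_, ?_⟩
    · rw [List.getD_eq_getElem S "" hp]; exact List.getElem_mem hp
    · rintro ⟨b, hpair, hsub⟩
      rcases (pairAt_iff S (S.getD p "") b).mpr hpair with ⟨j, i, hj, hi, hij, hslj, hbi⟩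
      by_cases hip : i = p
      · subst hip
        exact h j hj (fun hjp => hij hjp.symm)
          (by rw [hslj]; exact isIn_self _)
      · exact h i hi hip (by rw [hbi]; exact hsub)
  · rintro ⟨sl, hsl, h⟩
    rcases List.mem_iff_getElem.mp hsl with ⟨p, hp, hslp⟩
    refine ⟨p, hp, fun q hq hqp hsub => ?_⟩
    refine h ⟨S.getD q "", ?_, ?_⟩
    · exact (pairAt_iff S sl (S.getD q "")).mp
        ⟨p, q, hp, hq, hqp, by rw [List.getD_eq_getElem S "" hp]; exact hslp, rfl⟩
    · rw [List.getD_eq_getElem S "" hp, hslp] at hsub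
      exact hsub

-- PA ↔ PB: restricting to the filtered list preserves the condition
theorem main_iff (search_key : String) (L : List String) :
    (∃ sl ∈ L, PySem.Str.isIn sl (PySem.Str.upper search_key) = true ∧
        ¬ ∃ b, (sl ∈ L ∧ b ∈ L ∧ (sl ≠ b ∨ 2 ≤ L.count sl)) ∧
          PySem.Str.isIn sl b = true ∧ PySem.Str.isIn b (PySem.Str.upper search_key) = true) ↔
      (∃ sl ∈ L.filter (fun x => PySem.Str.isIn x (PySem.Str.upper search_key)),
        ¬ ∃ b, (sl ∈ L.filter (fun x => PySem.Str.isIn x (PySem.Str.upper search_key)) ∧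
                b ∈ L.filter (fun x => PySem.Str.isIn x (PySem.Str.upper search_key)) ∧
                (sl ≠ b ∨ 2 ≤ (L.filter (fun x => PySem.Str.isIn x (PySem.Str.upper search_key))).count sl)) ∧
          PySem.Str.isIn sl b = true) := by
  set K := PySem.Str.upper search_key with hK
  constructor
  · rintro ⟨sl, hslL, hslK, h⟩
    have hslS : sl ∈ L.filter (fun x => PySem.Str.isIn x K) := List.mem_filter.mpr ⟨hslL, hslK⟩
    refine ⟨sl, hslS, ?_⟩
    rintro ⟨b, ⟨_, hbS, hcase⟩, hsub⟩
    rcases List.mem_filter.mp hbS with ⟨hbL, hbK⟩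
    refine h ⟨b, ⟨hslL, hbL, ?_⟩, hsub, hbK⟩
    rcases hcase with hne | hcnt
    · exact Or.inl hne
    · right
      rwa [List.count_filter (p := fun x => PySem.Str.isIn x K) (a := sl) hslK] at hcnt
  · rintro ⟨sl, hslS, h⟩
    rcases List.mem_filter.mp hslS with ⟨hslL, hslK⟩
    refine ⟨sl, hslL, hslK, ?_⟩
    rintro ⟨b, ⟨_, hbL, hcase⟩, hsub, hbK⟩
    have hbS : b ∈ L.filter (fun x => PySem.Str.isIn x K) := List.mem_filter.mpr ⟨hbL, hbK⟩
    refine h ⟨b, ⟨hslS, hbS, ?_⟩, hsub⟩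
    rcases hcase with hne | hcnt
    · exact Or.inl hne
    · right
      rwa [← List.count_filter (p := fun x => PySem.Str.isIn x K) (a := sl) hslK] at hcnt

-- ===== VERDICT (by name: the statement is the Claim_ definition above) =====
theorem search_spec : Claim_equal_search := by
  intro search_key search_list _
  unfold Spec_search
  exact Bool.eq_iff_iff.mpr
    ((A_iff search_key search_list).trans
      ((main_iff search_key search_list).trans (B_iff search_key search_list).symm))
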